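-- pv_equiv track=rewrite | github.com/fiftyblue/spot-mlc-bmi-ascap | scripts/fetch_black17_publisher_works.py | extract_csv_columns
-- ===== SOURCE A (Python) =====
-- from typing import List, Dict, Any, Optional
--
-- def extract_csv_columns(works: List[Dict[str, Any]]) -> List[str]:
--     """Auto-detect CSV columns from first batch of works."""
--     if not works:
--         return []
--
--     # Collect all unique keys from first few works
--     all_keys = set()
--     for work in works[:10]:  # Sample first 10 works
--         all_keys.update(work.keys())
--
--     # Prioritize common/important fields
--     priority_fields = [
--         'property_id', 'id', 'work_id',
--         'title', 'title.keyword',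
--         'authors', 'author',
--         'isbn', 'isbn13', 'isbn10',
--         'format', 'binding',
--         'publication_date', 'publish_date',
--         'price', 'list_price',
--         'imprint', 'publisher',
--         'series', 'series_name',
--         'categories', 'category',
--         'description', 'summary'
--     ]
--
--     # Build column list: priority fields first, then others alphabetically
--     columns = []
--     for field in priority_fields:
--         if field in all_keys:
--             columns.append(field)
--             all_keys.remove(field)
--
--     # Add remaining fields alphabetically
--     columns.extend(sorted(all_keys))
--
--     return columns
-- ===== SOURCE B (Python) =====
-- from typing import List, Dict, Any
--
--
-- def extract_csv_columns(works: List[Dict[str, Any]]) -> List[str]: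
--     """Auto-detect CSV columns from first batch of works."""
--     priority_fields = [
--         'property_id', 'id', 'work_id',
--         'title', 'title.keyword',
--         'authors', 'author',
--         'isbn', 'isbn13', 'isbn10',
--         'format', 'binding',
--         'publication_date', 'publish_date',
--         'price', 'list_price',
--         'imprint', 'publisher',
--         'series', 'series_name',
--         'categories', 'category',
--         'description', 'summary'
--     ]
--     rank = {f: i for i, f in enumerate(priority_fields)}
--
--     all_keys = set()
--     for work in works[:10]:  # Sample first 10 works
--         all_keys.update(work.keys())
--
--     # One keyed sort: priority keys by their unique rank, all others share the
--     # sentinel rank and fall back to alphabetical order.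
--     sentinel = len(priority_fields)
--     return sorted(all_keys, key=lambda k: (rank.get(k, sentinel), k))
-- ===== Notes on version B (the rewrite author's own statement) =====
-- stated objective: alternative
-- what changed: Replaces A's explicit priority-list scan with set-removal followed by a separate alphabetical sort of the remainder by a single rank-keyed sort: a dict maps each priority field to its index, and one sorted(all_keys, key=(rank.get(k, sentinel), k)) produces the whole column list.
import Mathlib
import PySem

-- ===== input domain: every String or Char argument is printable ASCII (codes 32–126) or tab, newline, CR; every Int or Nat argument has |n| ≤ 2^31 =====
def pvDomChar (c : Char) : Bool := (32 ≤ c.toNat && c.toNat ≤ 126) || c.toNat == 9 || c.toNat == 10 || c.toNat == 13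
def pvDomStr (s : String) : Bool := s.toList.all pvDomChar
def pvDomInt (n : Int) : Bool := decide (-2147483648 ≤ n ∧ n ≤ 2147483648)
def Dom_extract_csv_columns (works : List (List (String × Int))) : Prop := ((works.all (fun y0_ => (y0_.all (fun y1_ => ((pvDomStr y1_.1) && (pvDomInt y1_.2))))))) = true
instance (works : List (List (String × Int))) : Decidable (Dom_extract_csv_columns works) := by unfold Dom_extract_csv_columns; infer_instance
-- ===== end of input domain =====

-- B replaces A's priority-scan-then-sort-the-rest with a single rank-keyed sort
-- (priority fields get their index as rank, everything else a shared sentinel);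
-- objective: alternative decomposition, same observable result.

-- ===== PORT A =====
-- 'priority_fields' literal, shared verbatim by both Pythons
def pvPriorityFields : List String :=
  ["property_id", "id", "work_id",
   "title", "title.keyword",
   "authors", "author",
   "isbn", "isbn13", "isbn10",
   "format", "binding",
   "publication_date", "publish_date",
   "price", "list_price",
   "imprint", "publisher",
   "series", "series_name",
   "categories", "category",
   "description", "summary"]

-- the key-collection loop, identical in both Pythons:
-- all_keys = set(); for work in works[:10]: all_keys.update(work.keys())
def pvCollectKeys (works : List (List (String × Int))) : PySem.Set String :=
  (PySem.List.slice works none (some 10)).foldl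
    (fun s w => PySem.Set.update s (PySem.Dict.keys (PySem.Dict.mk w))) PySem.Set.empty

def extract_csv_columns (works : List (List (String × Int))) : List String :=
  if works = [] then []
  else
    let all_keys := pvCollectKeys works
    let st := pvPriorityFields.foldl
      (fun (st : List String × PySem.Set String) field =>
        if PySem.Set.contains st.2 field then
          -- 'all_keys.remove(field)' runs only under the membership guard, so it
          -- never raises and equals discard
          (st.1 ++ [field], PySem.Set.discard st.2 field)
        else st) ([], all_keys)
    st.1 ++ PySem.List.sorted st.2 (fun x => x) false

-- ===== PORT B =====
-- rank = {f: i for i, f in enumerate(priority_fields)}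
def pvRank : PySem.Dict String Int :=
  PySem.Dict.ofList ((PySem.List.enumerate pvPriorityFields).map (fun p => (p.2, p.1)))

-- the sort key's first component: rank.get(k, sentinel) with sentinel = len(priority_fields)
def pvRk (k : String) : Int :=
  PySem.Dict.getD pvRank k (pvPriorityFields.length : Int)

def extract_csv_columns_alt (works : List (List (String × Int))) : List String :=
  PySem.List.sorted2 (pvCollectKeys works) pvRk (fun k => k) false

-- ===== PRECONDITION & SPEC =====
def Spec_extract_csv_columns (works : List (List (String × Int))) (out : List String) : Prop := out = extract_csv_columns_alt works
instance (works : List (List (String × Int))) (out : List String) : Decidable (Spec_extract_csv_columns works out) := by unfold Spec_extract_csv_columns; infer_instance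

-- ===== CLAIM (what is proved, stated in full; the proofs are below) =====
def Claim_equal_extract_csv_columns : Prop := ∀ (works : List (List (String × Int))), Dom_extract_csv_columns works → Spec_extract_csv_columns works (extract_csv_columns works)

-- ===== LEMMAS AND PROOFS =====

-- the strict "sort key" order B sorts by (rank first, then the string itself)
def pvRp (a b : String) : Prop := pvRk a < pvRk b ∨ (pvRk a = pvRk b ∧ a < b)

-- the associated non-strict order both outputs are shown to be sorted in
def pvLe (a b : String) : Prop := ¬ pvRp b a

-- the boolean comparison sorted2 uses, specialised to B's keys
def pvBefore (a b : String) : Bool :=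
  decide (pvRk a < pvRk b) || (!decide (pvRk b < pvRk a) && decide (a < b))

lemma pvBefore_iff (a b : String) : pvBefore a b = true ↔ pvRp a b := by
  unfold pvBefore pvRp
  simp only [Bool.or_eq_true, Bool.and_eq_true, Bool.not_eq_true', decide_eq_true_eq,
    decide_eq_false_iff_not]
  constructor
  · rintro (h | ⟨h2, h3⟩)
    · exact Or.inl h
    · rcases eq_or_lt_of_le (not_lt.mp h2) with h | h
      · exact Or.inr ⟨h, h3⟩
      · exact Or.inl h
  · rintro (h | ⟨h2, h3⟩)
    · exact Or.inl h
    · exact Or.inr ⟨by rw [h2]; exact lt_irrefl _, h3⟩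

lemma pvRp_trans {a b c : String} (h1 : pvRp a b) (h2 : pvRp b c) : pvRp a c := by
  unfold pvRp at *
  rcases h1 with h1 | ⟨h1, h1'⟩ <;> rcases h2 with h2 | ⟨h2, h2'⟩
  · exact Or.inl (lt_trans h1 h2)
  · exact Or.inl (h2 ▸ h1)
  · exact Or.inl (h1 ▸ h2)
  · exact Or.inr ⟨h1.trans h2, lt_trans h1' h2'⟩

lemma pvRp_asymm {a b : String} (h : pvRp a b) : ¬ pvRp b a := by
  unfold pvRp at *
  rcases h with h | ⟨he, hs⟩
  · rintro (h2 | ⟨h2e, _⟩)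
    · exact absurd h2 (not_lt.mpr h.le)
    · exact absurd h2e (ne_of_gt h)
  · rintro (h2 | ⟨_, hs2⟩)
    · exact absurd h2 (not_lt.mpr he.le)
    · exact absurd hs2 (not_lt.mpr hs.le)

lemma pvLe_antisymm {a b : String} (h1 : pvLe a b) (h2 : pvLe b a) : a = b := by
  unfold pvLe pvRp at *
  rw [not_or] at h1 h2
  have hk : pvRk a = pvRk b := le_antisymm (not_lt.mp h1.1) (not_lt.mp h2.1)
  have hab : ¬ a < b := fun h => h2.2 ⟨hk, h⟩
  have hba : ¬ b < a := fun h => h1.2 ⟨hk.symm, h⟩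
  exact le_antisymm (not_lt.mp hba) (not_lt.mp hab)

lemma pv_insertBy_nil (x : String) : PySem.List.insertBy pvBefore x [] = [x] := by
  simp [PySem.List.insertBy]

lemma pv_insertBy_cons (x y : String) (ys : List String) :
    PySem.List.insertBy pvBefore x (y :: ys) =
      if pvBefore x y then x :: y :: ys else y :: PySem.List.insertBy pvBefore x ys := by
  simp [PySem.List.insertBy]

lemma pv_insertBy_pairwise (x : String) :
    ∀ (l : List String), l.Pairwise pvLe → (PySem.List.insertBy pvBefore x l).Pairwise pvLe := by
  intro l
  induction l with
  | nil => intro _; rw [pv_insertBy_nil]; exact List.pairwise_singleton _ _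
  | cons y ys ih =>
    intro h
    rw [List.pairwise_cons] at h
    rw [pv_insertBy_cons]
    by_cases hb : pvBefore x y = true
    · rw [if_pos hb]
      have hxy : pvRp x y := (pvBefore_iff x y).mp hb
      rw [List.pairwise_cons]
      refine ⟨?_, List.pairwise_cons.mpr h⟩
      intro z hz
      rcases List.mem_cons.mp hz with rfl | hz
      · exact pvRp_asymm hxy
      · intro hzx
        exact h.1 z hz (pvRp_trans hzx hxy)
    · rw [if_neg hb]
      rw [List.pairwise_cons]
      refine ⟨?_, ih h.2⟩
      intro z hz
      rcases (PySem.List.mem_insertBy _ _ _ _).mp hz with rfl | hz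
      · exact fun hzy => hb ((pvBefore_iff z y).mpr hzy)
      · exact h.1 z hz

lemma pv_foldl_insertBy_pairwise :
    ∀ (xs init : List String), init.Pairwise pvLe →
      (xs.foldl (fun acc x => PySem.List.insertBy pvBefore x acc) init).Pairwise pvLe := by
  intro xs
  induction xs with
  | nil => intro init h; exact h
  | cons x xs ih =>
    intro init h
    rw [List.foldl_cons]
    exact ih _ (pv_insertBy_pairwise x init h)

lemma pv_alt_eq_foldl (works : List (List (String × Int))) :
    extract_csv_columns_alt works =
      (pvCollectKeys works).foldl (fun acc x => PySem.List.insertBy pvBefore x acc) [] := rfl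

lemma pv_alt_pairwise (works : List (List (String × Int))) :
    (extract_csv_columns_alt works).Pairwise pvLe := by
  rw [pv_alt_eq_foldl]
  exact pv_foldl_insertBy_pairwise _ [] (List.Pairwise.nil)

lemma pv_alt_perm (works : List (List (String × Int))) :
    (extract_csv_columns_alt works).Perm (pvCollectKeys works) :=
  PySem.List.sorted2_perm _ _ _ _

lemma pv_collect_nodup (works : List (List (String × Int))) : (pvCollectKeys works).Nodup := by
  unfold pvCollectKeys
  generalize (PySem.List.slice works none (some 10)) = l
  have : ∀ (l : List (List (String × Int))) (s : PySem.Set String), s.Nodup →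
      (l.foldl (fun s w => PySem.Set.update s (PySem.Dict.keys (PySem.Dict.mk w))) s).Nodup := by
    intro l
    induction l with
    | nil => intro s hs; exact hs
    | cons w l ih => intro s hs; exact ih _ (PySem.Set.nodup_update _ _ hs)
  exact this l _ List.nodup_nil

lemma pvP_nodup : pvPriorityFields.Nodup := by decide

lemma pvP_rank_pairwise : pvPriorityFields.Pairwise (fun a b => pvRk a < pvRk b) := by decide

lemma pvP_rank_lt : ∀ k ∈ pvPriorityFields, pvRk k < 24 := by decide

lemma pvRk_of_not_mem {k : String} (hk : k ∉ pvPriorityFields) : pvRk k = 24 := by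
  have hkeys : PySem.Dict.keys pvRank = pvPriorityFields := by decide
  have hnone : pvRank.get? k = none :=
    (PySem.Dict.get?_eq_none_iff_not_mem_keys pvRank k).mpr (hkeys ▸ hk)
  unfold pvRk
  rw [PySem.Dict.getD_of_get?_eq_none pvRank _ hnone]
  rfl

-- A's priority loop: after the scan, the columns are the priority fields present in s
-- (in priority order) and the set retains exactly the non-priority keys (in set order)
lemma pv_loopA (Pl : List String) (hnd : Pl.Nodup) :
    ∀ (cols : List String) (s : PySem.Set String),
      Pl.foldl
        (fun (st : List String × PySem.Set String) field =>
          if PySem.Set.contains st.2 field then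
            (st.1 ++ [field], PySem.Set.discard st.2 field)
          else st) (cols, s) =
      (cols ++ Pl.filter (fun g => PySem.Set.contains s g),
       s.filter (fun k => !Pl.contains k)) := by
  induction Pl with
  | nil => intro cols s; simp
  | cons f P ih =>
    intro cols s
    rw [List.nodup_cons] at hnd
    rw [List.foldl_cons, List.filter_cons]
    by_cases hf : PySem.Set.contains s f = true
    · rw [if_pos hf, if_pos hf, ih hnd.2]
      refine Prod.ext ?_ ?_
      · show cols ++ [f] ++ _ = cols ++ f :: _
        rw [List.append_assoc]
        refine congrArg (cols ++ ·) ?_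
        show [f] ++ _ = f :: _
        refine congrArg (f :: ·) (List.filter_congr ?_)
        intro g hg
        have hgf : g ≠ f := fun h => hnd.1 (h ▸ hg)
        refine Bool.coe_iff_coe.mp ?_
        rw [PySem.Set.contains_iff, PySem.Set.contains_iff, PySem.Set.mem_discard]
        exact and_iff_left hgf
      · show (PySem.Set.discard s f).filter _ = s.filter _
        unfold PySem.Set.discard
        rw [List.filter_filter]
        refine List.filter_congr ?_
        intro k _
        simp only [List.contains_cons]
        cases h1 : (k == f) <;> cases h2 : P.contains k <;> simp
    · rw [if_neg hf, if_neg hf, ih hnd.2]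
      have hf' : PySem.Set.contains s f = false := by
        revert hf; cases PySem.Set.contains s f <;> simp
      refine Prod.ext rfl ?_
      refine List.filter_congr ?_
      intro k hk
      have hkf : (k == f) = false := by
        refine beq_eq_false_iff_ne.mpr ?_
        rintro rfl
        rw [(PySem.Set.contains_iff s k).mpr hk] at hf'
        cases hf'
      simp only [List.contains_cons, hkf, Bool.false_or]

lemma pv_A_eq (works : List (List (String × Int))) (h : works ≠ []) :
    extract_csv_columns works =
      pvPriorityFields.filter (fun g => PySem.Set.contains (pvCollectKeys works) g) ++
      PySem.List.sorted
        ((pvCollectKeys works).filter (fun k => !pvPriorityFields.contains k))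
        (fun x => x) false := by
  unfold extract_csv_columns
  rw [if_neg h]
  show (pvPriorityFields.foldl _ ([], pvCollectKeys works)).1 ++
    PySem.List.sorted (pvPriorityFields.foldl _ ([], pvCollectKeys works)).2 (fun x => x) false = _
  rw [pv_loopA pvPriorityFields pvP_nodup]
  simp

lemma pv_mem_sorted_rk {works : List (List (String × Int))} {b : String}
    (hb : b ∈ PySem.List.sorted
      ((pvCollectKeys works).filter (fun k => !pvPriorityFields.contains k)) (fun x => x) false) :
    pvRk b = 24 := by
  rw [PySem.List.mem_sorted, List.mem_filter, Bool.not_eq_true'] at hb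
  refine pvRk_of_not_mem (fun hmem => ?_)
  rw [(List.contains_iff_mem).mpr hmem] at hb
  cases hb.2

lemma pv_pairwise_le_A (works : List (List (String × Int))) (h : works ≠ []) :
    (extract_csv_columns works).Pairwise pvLe := by
  rw [pv_A_eq works h, List.pairwise_append]
  refine ⟨?_, ?_, ?_⟩
  · exact (pvP_rank_pairwise.filter _).imp (fun hab => pvRp_asymm (Or.inl hab))
  · refine (PySem.List.sorted_pairwise _ _).imp_of_mem ?_
    intro a b ha hb hab
    have hra : pvRk a = 24 := pv_mem_sorted_rk ha
    have hrb : pvRk b = 24 := pv_mem_sorted_rk hb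
    rintro (hlt | ⟨_, hba⟩)
    · rw [hra, hrb] at hlt; exact lt_irrefl _ hlt
    · exact absurd hba (not_lt.mpr hab)
  · intro a ha b hb
    have hra : pvRk a < 24 := pvP_rank_lt a (List.mem_filter.mp ha).1
    have hrb : pvRk b = 24 := pv_mem_sorted_rk hb
    rintro (hlt | ⟨heq, _⟩)
    · rw [hrb] at hlt; exact lt_irrefl _ (lt_trans hlt hra)
    · rw [hrb] at heq; exact lt_irrefl _ (heq ▸ hra)

lemma pv_perm_A (works : List (List (String × Int))) (h : works ≠ []) :
    (extract_csv_columns works).Perm (pvCollectKeys works) := by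
  rw [pv_A_eq works h]
  have hS := pv_collect_nodup works
  have hX : (pvPriorityFields.filter (fun g => PySem.Set.contains (pvCollectKeys works) g)).Perm
      ((pvCollectKeys works).filter (fun k => pvPriorityFields.contains k)) := by
    rw [List.perm_ext_iff_of_nodup (pvP_nodup.filter _) (hS.filter _)]
    intro a
    simp only [List.mem_filter, PySem.Set.contains_iff, List.contains_iff_mem]
    exact and_comm
  refine ((hX.append (PySem.List.sorted_perm _ _ _)).trans ?_)
  exact List.filter_append_perm (fun k => pvPriorityFields.contains k) _


-- ===== VERDICT (by name: the statement is the Claim_ definition above) =====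
theorem extract_csv_columns_spec : Claim_equal_extract_csv_columns := by
  intro works _
  unfold Spec_extract_csv_columns
  by_cases h : works = []
  · subst h; rfl
  · refine List.eq_of_perm_of_sorted (fun a b _ _ h1 h2 => pvLe_antisymm h1 h2)
      (pv_pairwise_le_A works h) (pv_alt_pairwise works)
      ((pv_perm_A works h).trans (pv_alt_perm works).symm)
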